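-- pv_equiv track=rewrite | github.com/ranaur/filer | filer/commands/ls.py | format_mode
-- ===== SOURCE A (Python) =====
-- import stat
--
-- def format_mode(st_mode: int) -> str:
--     """Convert file mode to a string like 'drwxr-xr-x'."""
--     mode = []
--     # File type
--     if stat.S_ISDIR(st_mode):
--         mode.append('d')
--     elif stat.S_ISLNK(st_mode):
--         mode.append('l')
--     else:
--         mode.append('-')
--     # Permissions
--     for who in 'USR', 'GRP', 'OTH':
--         for what in 'R', 'W', 'X':
--             if st_mode & getattr(stat, f'S_I{what}{who}'):
--                 mode.append(what.lower())
--             else: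
--                 mode.append('-')
--     return ''.join(mode)
-- ===== SOURCE B (Python) =====
-- PERMS = ['---', '--x', '-w-', '-wx', 'r--', 'r-x', 'rw-', 'rwx']
--
-- def format_mode(st_mode: int) -> str:
--     """Convert file mode to a string like 'drwxr-xr-x'."""
--     fmt = st_mode & 0o170000
--     t = 'd' if fmt == 0o040000 else 'l' if fmt == 0o120000 else '-'
--     return t + ''.join(PERMS[(st_mode >> s) & 7] for s in (6, 3, 0))
-- ===== Notes on version B (the rewrite author's own statement) =====
-- stated objective: idiomatic
-- what changed: Replaces the 9-iteration per-bit loop over stat constants (built via getattr string formatting) by a precomputed 8-entry permission table indexed with each 3-bit group of the mode, three lookups in total.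
-- crash fix: On negative st_mode Python's stat.S_ISDIR raises OverflowError, while B returns the permission string of the two's-complement reading (e.g. '-rwxrwxrwx' for -1). — e.g. on format_mode(-1): A raises OverflowError, B returns "-rwxrwxrwx"
import Mathlib
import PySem

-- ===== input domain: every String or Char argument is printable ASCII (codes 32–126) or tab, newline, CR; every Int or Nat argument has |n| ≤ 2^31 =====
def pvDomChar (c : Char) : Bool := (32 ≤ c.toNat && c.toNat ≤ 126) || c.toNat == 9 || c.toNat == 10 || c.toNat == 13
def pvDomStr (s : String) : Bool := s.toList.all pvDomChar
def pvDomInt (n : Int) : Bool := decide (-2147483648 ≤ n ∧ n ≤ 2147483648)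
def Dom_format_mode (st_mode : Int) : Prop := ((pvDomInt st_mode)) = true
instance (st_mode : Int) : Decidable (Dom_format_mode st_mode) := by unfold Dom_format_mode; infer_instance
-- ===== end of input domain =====

-- B replaces A's 9-iteration per-bit reflection loop by a precomputed 8-entry
-- permission table indexed by each 3-bit group (three lookups); idiomatic/simpler.

-- ===== PORT A =====
-- st_mode & b for a power-of-two b (exact for Python's & on a single-bit mask)
def pyBit (n b : Int) : Int := ((n.fdiv b).fmod 2) * b
-- st_mode & 0o170000 (exact: the mask is the contiguous bits 12..15)
def pyIfmt (n : Int) : Int := ((n.fdiv 4096).fmod 16) * 4096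
-- getattr(stat, 'S_I' + what + who): the CPython stat-module constants
def statConst (what who : String) : Int :=
  if what = "R" then (if who = "USR" then 256 else if who = "GRP" then 32 else 4)
  else if what = "W" then (if who = "USR" then 128 else if who = "GRP" then 16 else 2)
  else (if who = "USR" then 64 else if who = "GRP" then 8 else 1)

def format_mode (st_mode : Int) : String :=
  let mode : List String :=
    if pyIfmt st_mode = 16384 then ["d"]          -- stat.S_ISDIR
    else if pyIfmt st_mode = 40960 then ["l"]     -- stat.S_ISLNK
    else ["-"]
  let mode := ["USR", "GRP", "OTH"].foldl (fun acc who =>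
    ["R", "W", "X"].foldl (fun acc what =>
      if pyBit st_mode (statConst what who) ≠ 0 then acc ++ [PySem.Str.lower what]
      else acc ++ ["-"]) acc) mode
  String.join mode

-- ===== PORT B =====
def PERMS : List String := ["---", "--x", "-w-", "-wx", "r--", "r-x", "rw-", "rwx"]

def format_mode_alt (st_mode : Int) : String :=
  let fmt := ((st_mode.fdiv 4096).fmod 16) * 4096       -- st_mode & 0o170000
  let t := if fmt = 16384 then "d" else if fmt = 40960 then "l" else "-"
  t ++ String.join (([6, 3, 0] : List Nat).map (fun s =>
    PERMS.getD ((st_mode.fdiv (2 ^ s)).fmod 8).toNat ""))  -- PERMS[(st_mode >> s) & 7]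

-- ===== PRECONDITION & SPEC =====
-- Pre_ excludes negative st_mode, on which Python's stat.S_ISDIR raises OverflowError.
def Pre_format_mode (st_mode : Int) : Prop := 0 ≤ st_mode
instance (st_mode : Int) : Decidable (Pre_format_mode st_mode) := by unfold Pre_format_mode; infer_instance
def pvWitness_format_mode : Int := (493)

-- A raises OverflowError on negative st_mode; B returns the two's-complement reading (e.g. '-rwxrwxrwx' at -1).
def Raises_format_mode (st_mode : Int) : Prop := st_mode < 0
instance (st_mode : Int) : Decidable (Raises_format_mode st_mode) := by unfold Raises_format_mode; infer_instance
def pvRaiseWitness_format_mode : Int := (-1)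
def pvRaiseWitnessOut_format_mode : String := "-rwxrwxrwx"

def Spec_format_mode (st_mode : Int) (out : String) : Prop := out = format_mode_alt st_mode
instance (st_mode : Int) (out : String) : Decidable (Spec_format_mode st_mode out) := by unfold Spec_format_mode; infer_instance

-- ===== CLAIM (what is proved, stated in full; the proofs are below) =====
def Claim_equal_format_mode : Prop := ∀ (st_mode : Int), Dom_format_mode st_mode → Pre_format_mode st_mode → Spec_format_mode st_mode (format_mode st_mode)
def Claim_raises_format_mode : Prop := (∀ (st_mode : Int), Dom_format_mode st_mode → Raises_format_mode st_mode → ¬ Pre_format_mode st_mode) ∧ (Dom_format_mode (pvRaiseWitness_format_mode) ∧ Raises_format_mode (pvRaiseWitness_format_mode) ∧ format_mode_alt (pvRaiseWitness_format_mode) = pvRaiseWitnessOut_format_mode)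

-- ===== LEMMAS AND PROOFS =====
theorem ite_append {α : Type} (c : Prop) [Decidable c] (a x y : List α) :
    (if c then a ++ x else a ++ y) = a ++ (if c then x else y) := by split <;> rfl

theorem A_shape (n : Int) : format_mode n =
    String.join ((if pyIfmt n = 16384 then ["d"] else if pyIfmt n = 40960 then ["l"] else ["-"]) ++
      (((if pyBit n 256 ≠ 0 then ["r"] else ["-"]) ++ ((if pyBit n 128 ≠ 0 then ["w"] else ["-"]) ++ (if pyBit n 64 ≠ 0 then ["x"] else ["-"]))) ++
      (((if pyBit n 32 ≠ 0 then ["r"] else ["-"]) ++ ((if pyBit n 16 ≠ 0 then ["w"] else ["-"]) ++ (if pyBit n 8 ≠ 0 then ["x"] else ["-"]))) ++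
      ((if pyBit n 4 ≠ 0 then ["r"] else ["-"]) ++ ((if pyBit n 2 ≠ 0 then ["w"] else ["-"]) ++ (if pyBit n 1 ≠ 0 then ["x"] else ["-"])))))) := by
  have hr : PySem.Str.lower "R" = "r" := by decide
  have hw : PySem.Str.lower "W" = "w" := by decide
  have hx : PySem.Str.lower "X" = "x" := by decide
  simp only [format_mode, List.foldl, statConst, hr, hw, hx,
    String.reduceEq, reduceIte, ite_append, List.append_assoc]

theorem perm_group64 (n : Int) :
    PERMS.getD ((n.fdiv ((2:Int) ^ (6:ℕ))).fmod 8).toNat "" =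
      String.join ((if pyBit n 256 ≠ 0 then ["r"] else ["-"]) ++
        ((if pyBit n 128 ≠ 0 then ["w"] else ["-"]) ++ (if pyBit n 64 ≠ 0 then ["x"] else ["-"]))) := by
  rw [show ((2:Int) ^ (6:ℕ)) = 64 from by norm_num]
  simp only [pyBit, Int.fdiv_eq_ediv_of_nonneg _ (by norm_num : (0:Int) ≤ 256),
    Int.fdiv_eq_ediv_of_nonneg _ (by norm_num : (0:Int) ≤ 128),
    Int.fdiv_eq_ediv_of_nonneg _ (by norm_num : (0:Int) ≤ 64),
    Int.fmod_eq_emod_of_nonneg _ (by norm_num : (0:Int) ≤ 2),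
    Int.fmod_eq_emod_of_nonneg _ (by norm_num : (0:Int) ≤ 8)]
  rw [show (n : Int) / 256 % 2 = n / 64 % 8 / 4 from by omega,
      show (n : Int) / 128 % 2 = n / 64 % 8 / 2 % 2 from by omega,
      show (n : Int) / 64 % 2 = n / 64 % 8 % 2 from by omega]
  have hq : n / 64 % 8 = 0 ∨ n / 64 % 8 = 1 ∨ n / 64 % 8 = 2 ∨ n / 64 % 8 = 3 ∨ n / 64 % 8 = 4 ∨ n / 64 % 8 = 5 ∨ n / 64 % 8 = 6 ∨ n / 64 % 8 = 7 := by omega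
  rcases hq with h|h|h|h|h|h|h|h <;> rw [h] <;> decide

theorem perm_group8 (n : Int) :
    PERMS.getD ((n.fdiv ((2:Int) ^ (3:ℕ))).fmod 8).toNat "" =
      String.join ((if pyBit n 32 ≠ 0 then ["r"] else ["-"]) ++
        ((if pyBit n 16 ≠ 0 then ["w"] else ["-"]) ++ (if pyBit n 8 ≠ 0 then ["x"] else ["-"]))) := by
  rw [show ((2:Int) ^ (3:ℕ)) = 8 from by norm_num]
  simp only [pyBit, Int.fdiv_eq_ediv_of_nonneg _ (by norm_num : (0:Int) ≤ 32),
    Int.fdiv_eq_ediv_of_nonneg _ (by norm_num : (0:Int) ≤ 16),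
    Int.fdiv_eq_ediv_of_nonneg _ (by norm_num : (0:Int) ≤ 8),
    Int.fmod_eq_emod_of_nonneg _ (by norm_num : (0:Int) ≤ 2),
    Int.fmod_eq_emod_of_nonneg _ (by norm_num : (0:Int) ≤ 8)]
  rw [show (n : Int) / 32 % 2 = n / 8 % 8 / 4 from by omega,
      show (n : Int) / 16 % 2 = n / 8 % 8 / 2 % 2 from by omega,
      show (n : Int) / 8 % 2 = n / 8 % 8 % 2 from by omega]
  have hq : n / 8 % 8 = 0 ∨ n / 8 % 8 = 1 ∨ n / 8 % 8 = 2 ∨ n / 8 % 8 = 3 ∨ n / 8 % 8 = 4 ∨ n / 8 % 8 = 5 ∨ n / 8 % 8 = 6 ∨ n / 8 % 8 = 7 := by omega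
  rcases hq with h|h|h|h|h|h|h|h <;> rw [h] <;> decide

theorem perm_group1 (n : Int) :
    PERMS.getD ((n.fdiv ((2:Int) ^ (0:ℕ))).fmod 8).toNat "" =
      String.join ((if pyBit n 4 ≠ 0 then ["r"] else ["-"]) ++
        ((if pyBit n 2 ≠ 0 then ["w"] else ["-"]) ++ (if pyBit n 1 ≠ 0 then ["x"] else ["-"]))) := by
  rw [show ((2:Int) ^ (0:ℕ)) = 1 from by norm_num]
  simp only [pyBit, Int.fdiv_eq_ediv_of_nonneg _ (by norm_num : (0:Int) ≤ 4),
    Int.fdiv_eq_ediv_of_nonneg _ (by norm_num : (0:Int) ≤ 2),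
    Int.fdiv_eq_ediv_of_nonneg _ (by norm_num : (0:Int) ≤ 1),
    Int.fmod_eq_emod_of_nonneg _ (by norm_num : (0:Int) ≤ 2),
    Int.fmod_eq_emod_of_nonneg _ (by norm_num : (0:Int) ≤ 8)]
  rw [show (n : Int) / 4 % 2 = n / 1 % 8 / 4 from by omega,
      show (n : Int) / 2 % 2 = n / 1 % 8 / 2 % 2 from by omega,
      show (n : Int) / 1 % 2 = n / 1 % 8 % 2 from by omega]
  have hq : n / 1 % 8 = 0 ∨ n / 1 % 8 = 1 ∨ n / 1 % 8 = 2 ∨ n / 1 % 8 = 3 ∨ n / 1 % 8 = 4 ∨ n / 1 % 8 = 5 ∨ n / 1 % 8 = 6 ∨ n / 1 % 8 = 7 := by omega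
  rcases hq with h|h|h|h|h|h|h|h <;> rw [h] <;> decide

theorem fold_app (init : String) (l : List String) :
    List.foldl (· ++ ·) init l = init ++ List.foldl (· ++ ·) "" l := by
  induction l generalizing init with
  | nil => simp [List.foldl]
  | cons h t ih =>
    rw [List.foldl_cons, List.foldl_cons, ih (init ++ h), ih ("" ++ h)]
    simp [String.append_assoc]
theorem myjoin_nil : String.join [] = "" := rfl
theorem myjoin_cons (s : String) (l : List String) : String.join (s :: l) = s ++ String.join l := by
  rw [String.join, String.join, List.foldl_cons, fold_app]
  simp
theorem myjoin_append (a b : List String) : String.join (a ++ b) = String.join a ++ String.join b := by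
  induction a with
  | nil => simp [myjoin_nil]
  | cons h t ih => simp [myjoin_cons, ih, String.append_assoc]

theorem final (n : Int) : format_mode n = format_mode_alt n := by
  rw [A_shape]
  simp only [format_mode_alt, List.map]
  rw [perm_group64, perm_group8, perm_group1]
  simp only [pyIfmt, myjoin_append, myjoin_cons, myjoin_nil, apply_ite String.join,
    String.append_assoc, String.append_empty]

-- ===== VERDICT (by name: the statement is the Claim_ definition above) =====
theorem format_mode_spec : Claim_equal_format_mode := by
  intro n _ _
  unfold Spec_format_mode
  exact final n

def format_mode_raises : Claim_raises_format_mode := by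
  unfold Claim_raises_format_mode
  exact ⟨fun n _ h hp => absurd hp (by unfold Pre_format_mode Raises_format_mode at *; omega), by decide⟩
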